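-- pv_equiv track=rewrite | github.com/mtyszler/advent-of-code-2022 | src/functions_day_25.py | convert_from_snafu
-- ===== SOURCE A (Python) =====
-- def convert_from_snafu(string: str) -> int:
--     """
--
--     Args:
--         string:
--
--     Returns:
--
--     """
--
--     number = 0
--     for i in range(len(string)):
--         this_string = string[-(i + 1)]
--         if this_string == '=':
--             this_string = -2
--         elif this_string == '-':
--             this_string = -1
--         else:
--             this_string = int(this_string)
--
--         number += this_string * (5 ** i)
--
--     return number
-- ===== SOURCE B (Python) =====
-- def convert_from_snafu(string: str) -> int:
--     number = 0
--     for ch in string: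
--         if ch == '=':
--             digit = -2
--         elif ch == '-':
--             digit = -1
--         else:
--             digit = int(ch)
--         number = number * 5 + digit
--     return number
-- ===== Notes on version B (the rewrite author's own statement) =====
-- stated objective: idiomatic
-- what changed: Replaces the reversed-index loop that weights each digit by an explicitly computed power 5**i with a forward Horner scan (number = number*5 + digit) over the characters, so no power is ever computed.
import Mathlib
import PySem

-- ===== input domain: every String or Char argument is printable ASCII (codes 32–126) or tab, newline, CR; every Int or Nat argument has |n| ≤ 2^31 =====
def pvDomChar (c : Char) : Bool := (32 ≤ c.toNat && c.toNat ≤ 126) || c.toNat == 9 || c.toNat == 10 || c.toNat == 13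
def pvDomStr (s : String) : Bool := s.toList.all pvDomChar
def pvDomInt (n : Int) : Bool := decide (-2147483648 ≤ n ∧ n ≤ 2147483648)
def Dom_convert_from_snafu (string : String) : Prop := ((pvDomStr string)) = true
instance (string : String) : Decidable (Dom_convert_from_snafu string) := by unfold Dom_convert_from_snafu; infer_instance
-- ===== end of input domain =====

-- B replaces the reversed-index loop weighting digits by 5**i with a forward Horner scan (idiomatic; no power computed).

-- ===== PORT A =====
def convert_from_snafu (string : String) : Int :=
  (PySem.List.pyRange 0 (PySem.Str.len string) 1).foldl
    (fun number i =>
      let this_string := (PySem.Str.pyGet? string (-(i + 1))).getD ' '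
      number +
        (if this_string = '=' then -2
         else if this_string = '-' then -1
         else (PySem.Int.ofChars? [this_string]).getD 0) * 5 ^ i.toNat) 0

-- ===== PORT B =====
def convert_from_snafu_alt (string : String) : Int :=
  string.toList.foldl
    (fun number ch =>
      number * 5 +
        (if ch = '=' then -2
         else if ch = '-' then -1
         else (PySem.Int.ofChars? [ch]).getD 0)) 0

-- ===== PRECONDITION & SPEC =====
-- Pre_ admits exactly the strings whose every character is a decimal digit or one of the two
-- SNAFU sign characters: on any other character int() raises ValueError in both A and B.
def Pre_convert_from_snafu (string : String) : Prop :=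
  string.toList.all (fun c => c == '=' || c == '-' || c.isDigit) = true
instance (string : String) : Decidable (Pre_convert_from_snafu string) := by
  unfold Pre_convert_from_snafu; infer_instance
def pvWitness_convert_from_snafu : String := "2=-01"

def Spec_convert_from_snafu (string : String) (out : Int) : Prop := out = convert_from_snafu_alt string
instance (string : String) (out : Int) : Decidable (Spec_convert_from_snafu string out) := by unfold Spec_convert_from_snafu; infer_instance

-- ===== CLAIM (what is proved, stated in full; the proofs are below) =====
def Claim_equal_convert_from_snafu : Prop := ∀ (string : String), Dom_convert_from_snafu string → Pre_convert_from_snafu string → Spec_convert_from_snafu string (convert_from_snafu string)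

-- ===== LEMMAS AND PROOFS =====

-- digit value of one character (proof-side helper; both ports inline this branch)
def snafuD (c : Char) : Int :=
  if c = '=' then -2 else if c = '-' then -1 else (PySem.Int.ofChars? [c]).getD 0

-- little-endian value of a digit list (least significant first)
def snafuLE : List Char → Int
  | [] => 0
  | c :: t => snafuD c + 5 * snafuLE t

lemma snafuLE_append_singleton (xs : List Char) (c : Char) :
    snafuLE (xs ++ [c]) = snafuLE xs + snafuD c * 5 ^ xs.length := by
  induction xs with
  | nil => simp [snafuLE]
  | cons x t ih => simp [snafuLE, ih]; ring

lemma termA (l : List Char) (k : Nat) (hk : k < l.length) :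
    (PySem.List.pyGet? l (-((k : Int) + 1))).getD ' ' = l.reverse.getD k ' ' := by
  have h : -((k : Int) + 1) = -(((k + 1 : Nat) : Int)) := by push_cast; ring
  rw [h, PySem.List.pyGet?_neg_natCast l (k + 1) (by omega) (by omega)]
  have hrev : l.reverse[k]? = l[l.length - 1 - k]? := List.getElem?_reverse hk
  have : l.length - (k + 1) = l.length - 1 - k := by omega
  simp [List.getD_eq_getElem?_getD, hrev, this]

lemma sum_range_eq_snafuLE (r : List Char) :
    ((List.range r.length).map (fun k => snafuD (r.getD k ' ') * 5 ^ k)).sum = snafuLE r := by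
  induction r with
  | nil => simp [snafuLE]
  | cons c t ih =>
    rw [List.length_cons, List.range_succ_eq_map, List.map_cons, List.map_map, List.sum_cons]
    have hmap : List.map ((fun k => snafuD ((c :: t).getD k ' ') * 5 ^ k) ∘ Nat.succ)
        (List.range t.length)
        = List.map (fun k => 5 * (snafuD (t.getD k ' ') * 5 ^ k)) (List.range t.length) := by
      apply List.map_congr_left
      intro k _
      simp only [Function.comp_apply, List.getD_cons_succ, pow_succ]
      ring
    rw [hmap, List.sum_map_mul_left, ih]
    simp [snafuLE]

lemma A_eq_snafuLE (s : String) :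
    convert_from_snafu s = snafuLE s.toList.reverse := by
  unfold convert_from_snafu
  rw [PySem.Str.len_eq, PySem.List.pyRange_zero_natCast]
  rw [List.foldl_map, PySem.List.foldl_add
    (g := fun k : Nat =>
      (let this_string := (PySem.Str.pyGet? s (-((k : Int) + 1))).getD ' '
       (if this_string = '=' then -2
        else if this_string = '-' then -1
        else (PySem.Int.ofChars? [this_string]).getD 0) * 5 ^ (k : Int).toNat))]
  rw [zero_add, ← sum_range_eq_snafuLE s.toList.reverse, List.length_reverse]
  congr 1
  apply List.map_congr_left
  intro k hk
  have hk' : k < s.toList.length := List.mem_range.mp hk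
  have hget : (PySem.Str.pyGet? s (-((k : Int) + 1))).getD ' '
      = s.toList.reverse.getD k ' ' := by
    rw [PySem.Str.pyGet?_eq]
    simpa using termA s.toList k hk'
  simp only [hget, Int.toNat_natCast, snafuD]

lemma B_horner (l : List Char) (a : Int) :
    l.foldl (fun number ch => number * 5 + snafuD ch) a
      = a * 5 ^ l.length + snafuLE l.reverse := by
  induction l generalizing a with
  | nil => simp [snafuLE]
  | cons c t ih =>
    rw [List.foldl_cons, ih, List.reverse_cons, snafuLE_append_singleton]
    simp [pow_succ, List.length_reverse]
    ring

-- ===== VERDICT (by name: the statement is the Claim_ definition above) =====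
theorem convert_from_snafu_spec : Claim_equal_convert_from_snafu := by
  intro s _ _
  unfold Spec_convert_from_snafu convert_from_snafu_alt
  rw [A_eq_snafuLE]
  have := B_horner s.toList 0
  simp only [snafuD] at this
  rw [this, zero_mul, zero_add]
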